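-- pv_equiv track=rewrite | github.com/dcross23/AoC2020 | Day5/p5.py | binaryColumnSearch
-- ===== SOURCE A (Python) =====
-- def binaryColumnSearch(column, remainingColumns):
--     if not column or len(remainingColumns) == 1:
--         return remainingColumns[0]
--     else:
--         if column[0] == 'L':
--             remainingColumns = [remainingColumns[0], int((remainingColumns[0] + remainingColumns[1])/2)]
--
--         elif column[0] == 'R':
--             remainingColumns = [int((remainingColumns[0] + remainingColumns[1])/2)+1, remainingColumns[1]]
--
--         return binaryColumnSearch(column[1:], remainingColumns)
-- ===== SOURCE B (Python) =====
-- def binaryColumnSearch(column, remainingColumns):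
--     if not column or len(remainingColumns) == 1:
--         return remainingColumns[0]
--     lo, hi = remainingColumns[0], remainingColumns[1]
--     for c in column:
--         if c == 'L':
--             hi = int((lo + hi) / 2)
--         elif c == 'R':
--             lo = int((lo + hi) / 2) + 1
--     return lo
-- ===== Notes on version B (the rewrite author's own statement) =====
-- stated objective: faster
-- what changed: Replaces the recursion that rebuilds a fresh two-element list and copies the string tail (column[1:]) at every step with a single loop over the characters keeping lo/hi as scalar accumulators.
import Mathlib
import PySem

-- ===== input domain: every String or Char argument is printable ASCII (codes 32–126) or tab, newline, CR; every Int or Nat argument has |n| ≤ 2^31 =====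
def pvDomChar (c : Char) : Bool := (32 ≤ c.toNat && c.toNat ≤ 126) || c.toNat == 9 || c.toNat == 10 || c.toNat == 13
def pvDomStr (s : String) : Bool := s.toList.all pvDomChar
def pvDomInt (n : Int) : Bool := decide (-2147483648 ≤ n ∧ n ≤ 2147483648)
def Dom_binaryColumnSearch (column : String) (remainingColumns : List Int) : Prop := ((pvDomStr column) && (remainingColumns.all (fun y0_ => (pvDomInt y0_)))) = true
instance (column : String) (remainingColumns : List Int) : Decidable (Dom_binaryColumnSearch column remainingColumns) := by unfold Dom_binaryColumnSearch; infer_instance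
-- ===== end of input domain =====

-- ===== PORT A =====
-- B replaces A's recursion (which copies column[1:] and rebuilds a list each step) by one loop with scalar lo/hi accumulators: faster.
-- int((a+b)/2) on these bounded ints is exact float division then truncation toward zero = Int.tdiv.
def binaryColumnSearchA : List Char → List Int → Int
  | [], rc => rc.getD 0 0
  | c :: cs, rc =>
    if rc.length = 1 then rc.getD 0 0
    else
      let rc' :=
        if c = 'L' then [rc.getD 0 0, (rc.getD 0 0 + rc.getD 1 0).tdiv 2]
        else if c = 'R' then [(rc.getD 0 0 + rc.getD 1 0).tdiv 2 + 1, rc.getD 1 0]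
        else rc
      binaryColumnSearchA cs rc'

def binaryColumnSearch (column : String) (remainingColumns : List Int) : Int :=
  binaryColumnSearchA column.toList remainingColumns

-- ===== PORT B =====
def binaryColumnSearchAltLoop : List Char → Int → Int → Int
  | [], lo, _ => lo
  | c :: cs, lo, hi =>
    if c = 'L' then binaryColumnSearchAltLoop cs lo ((lo + hi).tdiv 2)
    else if c = 'R' then binaryColumnSearchAltLoop cs ((lo + hi).tdiv 2 + 1) hi
    else binaryColumnSearchAltLoop cs lo hi

def binaryColumnSearch_alt (column : String) (remainingColumns : List Int) : Int :=
  if column.toList = [] ∨ remainingColumns.length = 1 then remainingColumns.getD 0 0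
  else binaryColumnSearchAltLoop column.toList (remainingColumns.getD 0 0) (remainingColumns.getD 1 0)

-- ===== PRECONDITION & SPEC =====
-- Pre_ excludes exactly the empty remainingColumns, on which A raises IndexError.
def Pre_binaryColumnSearch (column : String) (remainingColumns : List Int) : Prop :=
  remainingColumns ≠ []
instance (column : String) (remainingColumns : List Int) : Decidable (Pre_binaryColumnSearch column remainingColumns) := by unfold Pre_binaryColumnSearch; infer_instance
def pvWitness_binaryColumnSearch : String × List Int := ("RLR", [0, 7])

def Spec_binaryColumnSearch (column : String) (remainingColumns : List Int) (out : Int) : Prop := out = binaryColumnSearch_alt column remainingColumns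
instance (column : String) (remainingColumns : List Int) (out : Int) : Decidable (Spec_binaryColumnSearch column remainingColumns out) := by unfold Spec_binaryColumnSearch; infer_instance

-- ===== CLAIM (what is proved, stated in full; the proofs are below) =====
def Claim_equal_binaryColumnSearch : Prop := ∀ (column : String) (remainingColumns : List Int), Dom_binaryColumnSearch column remainingColumns → Pre_binaryColumnSearch column remainingColumns → Spec_binaryColumnSearch column remainingColumns (binaryColumnSearch column remainingColumns)

-- ===== LEMMAS AND PROOFS =====
theorem auxA_eq_loop (cs : List Char) (rc : List Int) (h : 2 ≤ rc.length) :
    binaryColumnSearchA cs rc = binaryColumnSearchAltLoop cs (rc.getD 0 0) (rc.getD 1 0) := by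
  induction cs generalizing rc with
  | nil => simp [binaryColumnSearchA, binaryColumnSearchAltLoop]
  | cons c cs ih =>
    have hne : rc.length ≠ 1 := by omega
    simp only [binaryColumnSearchA, binaryColumnSearchAltLoop, hne, if_false]
    by_cases hL : c = 'L'
    · simp only [hL, if_true]
      rw [ih _ (by simp)]
      simp
    · by_cases hR : c = 'R'
      · simp only [hL, hR, if_true, if_false]
        rw [ih _ (by simp)]
        simp
      · simp only [hL, hR, if_false]
        exact ih rc h

-- ===== VERDICT (by name: the statement is the Claim_ definition above) =====
theorem binaryColumnSearch_spec : Claim_equal_binaryColumnSearch := by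
  intro column rc _ hpre
  unfold Spec_binaryColumnSearch binaryColumnSearch binaryColumnSearch_alt
  by_cases hcol : column.toList = []
  · simp [hcol, binaryColumnSearchA]
  · by_cases h1 : rc.length = 1
    · cases cs : column.toList with
      | nil => exact absurd cs hcol
      | cons c t => simp [binaryColumnSearchA, h1]
    · have h2 : 2 ≤ rc.length := by
        have : rc.length ≠ 0 := by simpa using hpre
        omega
      simp only [hcol, h1, or_self, if_false, false_or]
      exact auxA_eq_loop _ _ h2
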